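-- pv_equiv track=rewrite | github.com/SewoongPark/CodingTest_rep | 프로그래머스/lv1/12930. 이상한 문자 만들기/이상한 문자 만들기.py | solution
-- ===== SOURCE A (Python) =====
-- def solution(s):
--     answer = ''
--     # 짝수번째 알파벳은 대문자로
--     # 홀수번째 알파벳은 소문자로
--
--     # 공백을 구분해서 나눈 단어들의 인덱스를 조회
--     s = s.split(" ")
--     zzac = []
--     hol = []
--
--     for alpha in s:
--         for i, alp in enumerate(alpha):
--             if i % 2 == 0:
--                 answer += alp.upper()
--             else:
--                 answer += alp.lower()
--         answer += " "
--     return answer[:-1]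
-- ===== SOURCE B (Python) =====
-- def solution(s):
--     out = []
--     i = 0
--     for c in s:
--         if c == " ":
--             out.append(" ")
--             i = 0
--         else:
--             out.append(c.upper() if i % 2 == 0 else c.lower())
--             i += 1
--     return "".join(out)
-- ===== Notes on version B (the rewrite author's own statement) =====
-- stated objective: simpler
-- what changed: Replace split-on-space / per-word enumerate / rejoin-and-trim with a single pass over the string that keeps an index counter reset at each space, so spaces are copied in place and no trailing-space trim is needed.
import Mathlib
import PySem

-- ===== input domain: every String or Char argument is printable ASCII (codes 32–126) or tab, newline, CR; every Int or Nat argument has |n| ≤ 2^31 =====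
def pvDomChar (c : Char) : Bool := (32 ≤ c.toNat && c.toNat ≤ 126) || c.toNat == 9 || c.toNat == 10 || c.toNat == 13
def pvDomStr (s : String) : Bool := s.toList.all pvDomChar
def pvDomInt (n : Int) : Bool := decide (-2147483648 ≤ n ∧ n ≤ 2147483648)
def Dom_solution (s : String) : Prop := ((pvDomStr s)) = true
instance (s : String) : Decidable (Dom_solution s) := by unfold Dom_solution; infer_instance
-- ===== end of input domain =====

-- B is simpler: one pass with an index counter reset at spaces, instead of split / per-word enumerate / rejoin-and-trim.

-- ===== PORT A =====
def solution (s : String) : String :=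
  let ws := PySem.Chars.splitOn s.toList [' ']
  let answer := ws.foldl (fun answer alpha =>
    ((PySem.List.enumerate alpha 0).foldl
       (fun answer p =>
         answer ++ [if PySem.Int.mod p.1 2 = 0 then PySem.Chars.upperChar p.2
                    else PySem.Chars.lowerChar p.2])
       answer) ++ [' ']) ([] : List Char)
  String.ofList (PySem.List.slice answer none (some (-1)))

-- ===== PORT B =====
def solution_alt (s : String) : String :=
  let r := s.toList.foldl (fun (st : List Char × Nat) c =>
    if c = ' ' then (st.1 ++ [' '], 0)
    else (st.1 ++ [if st.2 % 2 = 0 then PySem.Chars.upperChar c else PySem.Chars.lowerChar c],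
          st.2 + 1)) (([] : List Char), 0)
  String.ofList r.1

-- ===== PRECONDITION & SPEC =====
def Spec_solution (s : String) (out : String) : Prop := out = solution_alt s
instance (s : String) (out : String) : Decidable (Spec_solution s out) := by unfold Spec_solution; infer_instance

-- ===== CLAIM (what is proved, stated in full; the proofs are below) =====
def Claim_equal_solution : Prop := ∀ (s : String), Dom_solution s → Spec_solution s (solution s)

-- ===== LEMMAS AND PROOFS =====

-- simple structural split on ' ' (proof-side model of PySem.Chars.splitOn at sep [' '])
def spSp : List Char → List (List Char)
  | [] => [[]]
  | c :: rest => if c = ' ' then [] :: spSp rest else (spSp rest).modifyHead (c :: ·)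

theorem spSp_ne_nil (cs : List Char) : spSp cs ≠ [] := by
  induction cs with
  | nil => simp [spSp]
  | cons c rest ih =>
    simp only [spSp]
    split
    · simp
    · cases h : spSp rest with
      | nil => exact absurd h ih
      | cons hd tl => simp [List.modifyHead]

theorem splitOn_go_eq (l : List Char) : ∀ (fuel : Nat) (cur : List Char) (acc : List (List Char)) (_hf : l.length < fuel),
    PySem.Chars.splitOn.go [' '] fuel l cur acc
      = acc.reverse ++ (cur.reverse ++ (spSp l).headD []) :: (spSp l).tail := by
  induction l with
  | nil =>
    intro fuel cur acc hf
    cases fuel with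
    | zero => omega
    | succ f => rw [PySem.Chars.splitOn.go.eq_def]; simp [spSp]
  | cons c rest ih =>
    intro fuel cur acc hf
    cases fuel with
    | zero => omega
    | succ f =>
      by_cases hc : c = ' '
      · subst hc
        have hpre : List.isPrefixOf [' '] (' ' :: rest) = true := by simp [List.isPrefixOf]
        rw [PySem.Chars.splitOn.go.eq_def]
        simp only [hpre, if_pos]
        have hdrop : List.drop [' '].length (' ' :: rest) = rest := rfl
        rw [hdrop]
        have := ih f [] (cur.reverse :: acc) (by simp at hf ⊢; omega)
        rw [this]
        obtain ⟨hd, tl, hsp⟩ : ∃ hd tl, spSp rest = hd :: tl := by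
          cases h : spSp rest with
          | nil => exact absurd h (spSp_ne_nil rest)
          | cons hd tl => exact ⟨hd, tl, rfl⟩
        simp [spSp, hsp]
      · have hpre : List.isPrefixOf [' '] (c :: rest) = false := by
          simp [List.isPrefixOf]; exact fun h => absurd h.symm hc
        rw [PySem.Chars.splitOn.go.eq_def]
        simp only [hpre, Bool.false_eq_true, if_false]
        have := ih f (c :: cur) acc (by simp at hf ⊢; omega)
        rw [this]
        obtain ⟨hd, tl, hsp⟩ : ∃ hd tl, spSp rest = hd :: tl := by
          cases h : spSp rest with
          | nil => exact absurd h (spSp_ne_nil rest)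
          | cons hd tl => exact ⟨hd, tl, rfl⟩
        simp [spSp, hsp, hc, List.modifyHead]

theorem splitOn_eq_spSp (cs : List Char) : PySem.Chars.splitOn cs [' '] = spSp cs := by
  have := splitOn_go_eq cs (cs.length + 1) [] [] (by omega)
  rw [PySem.Chars.splitOn, this]
  obtain ⟨hd, tl, hsp⟩ : ∃ hd tl, spSp cs = hd :: tl := by
    cases h : spSp cs with
    | nil => exact absurd h (spSp_ne_nil cs)
    | cons hd tl => exact ⟨hd, tl, rfl⟩
  simp [hsp]

-- per-character case function (A's branch body)
def caseF (p : Int × Char) : Char :=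
  if PySem.Int.mod p.1 2 = 0 then PySem.Chars.upperChar p.2 else PySem.Chars.lowerChar p.2

-- A's outer fold is a flatMap over the words
theorem Afold_eq_flatMap (ws : List (List Char)) (acc : List Char) :
    ws.foldl (fun answer alpha =>
      ((PySem.List.enumerate alpha 0).foldl (fun answer p => answer ++ [caseF p]) answer) ++ [' ']) acc
    = acc ++ ws.flatMap (fun w => (PySem.List.enumerate w 0).map caseF ++ [' ']) := by
  induction ws generalizing acc with
  | nil => simp
  | cons w ws ih =>
    simp only [List.foldl_cons, List.flatMap_cons]
    rw [PySem.List.foldl_append_singleton_eq_map, ih]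
    simp

-- B's recursion, proof-side form
def altGo : List Char → Nat → List Char
  | [], _ => []
  | c :: rest, i =>
    if c = ' ' then ' ' :: altGo rest 0
    else (if i % 2 = 0 then PySem.Chars.upperChar c else PySem.Chars.lowerChar c) :: altGo rest (i + 1)

theorem Bfold_eq_altGo (cs : List Char) : ∀ (out : List Char) (i : Nat),
    (cs.foldl (fun (st : List Char × Nat) c =>
      if c = ' ' then (st.1 ++ [' '], 0)
      else (st.1 ++ [if st.2 % 2 = 0 then PySem.Chars.upperChar c else PySem.Chars.lowerChar c],
            st.2 + 1)) (out, i)).1 = out ++ altGo cs i := by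
  induction cs with
  | nil => intro out i; simp [altGo]
  | cons c rest ih =>
    intro out i
    by_cases hc : c = ' ' <;> simp [altGo, hc, ih]

-- main bridge: B's single pass (plus a trailing space) equals A's word-by-word output
theorem altGo_main (cs : List Char) : ∀ (i : Nat),
    altGo cs i ++ [' ']
      = (PySem.List.enumerate ((spSp cs).headD []) (i : Int)).map caseF ++ [' ']
        ++ (spSp cs).tail.flatMap (fun w => (PySem.List.enumerate w 0).map caseF ++ [' ']) := by
  induction cs with
  | nil => intro i; simp [altGo, spSp, PySem.List.enumerate_nil]
  | cons c rest ih =>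
    intro i
    by_cases hc : c = ' '
    · subst hc
      obtain ⟨hd, tl, hsp⟩ : ∃ hd tl, spSp rest = hd :: tl := by
        cases h : spSp rest with
        | nil => exact absurd h (spSp_ne_nil rest)
        | cons hd tl => exact ⟨hd, tl, rfl⟩
      have := ih 0
      rw [hsp] at this
      simp only [List.headD_cons, List.tail_cons] at this
      simp [altGo, spSp, hsp, PySem.List.enumerate_nil, this]
    · obtain ⟨hd, tl, hsp⟩ : ∃ hd tl, spSp rest = hd :: tl := by
        cases h : spSp rest with
        | nil => exact absurd h (spSp_ne_nil rest)
        | cons hd tl => exact ⟨hd, tl, rfl⟩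
      have := ih (i + 1)
      rw [hsp] at this
      simp only [List.headD_cons, List.tail_cons] at this
      simp only [altGo, hc, if_false, spSp, List.modifyHead, hsp, List.headD_cons, List.tail_cons,
        PySem.List.enumerate_cons, List.map_cons, List.cons_append]
      rw [show ((i + 1 : Nat) : Int) = (i : Int) + 1 by push_cast; ring] at this
      rw [this]
      congr 1
      simp only [caseF]
      rcases Nat.mod_two_eq_zero_or_one i with h | h
      · simp [h]
        intro hbad
        exact absurd hbad (by omega)
      · simp [h]
        intro hbad
        exact absurd hbad (by omega)

-- ===== VERDICT (by name: the statement is the Claim_ definition above) =====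
theorem solution_spec : Claim_equal_solution := by
  intro s _
  unfold Spec_solution solution solution_alt
  simp only []
  rw [splitOn_eq_spSp]
  have hA := Afold_eq_flatMap (spSp s.toList) []
  simp only [caseF] at hA
  rw [hA]
  rw [Bfold_eq_altGo s.toList [] 0]
  have hm := altGo_main s.toList 0
  obtain ⟨hd, tl, hsp⟩ : ∃ hd tl, spSp s.toList = hd :: tl := by
    cases h : spSp s.toList with
    | nil => exact absurd h (spSp_ne_nil s.toList)
    | cons hd tl => exact ⟨hd, tl, rfl⟩
  rw [hsp] at hm ⊢
  simp only [List.headD_cons, List.tail_cons, Int.natCast_zero] at hm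
  simp only [List.flatMap_cons, List.nil_append, ← List.append_assoc] at hm ⊢
  rw [← hm]
  rw [PySem.List.slice_to_neg_one, List.dropLast_concat]
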